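-- pv_equiv track=rewrite | github.com/yowatanabe/learn-to-code | python/123/main.py | count_even_sum_pairs
-- ===== SOURCE A (Python) =====
-- from typing import List
--
-- def count_even_sum_pairs(nums: List[int]) -> int:
--     even = 0
--     odd = 0
--
--     for num in nums:
--         if num % 2 == 0:
--             even += 1
--         else:
--             odd += 1
--
--     # 組み合わせの数: nC2 = n * (n-1) // 2
--     return (even * (even - 1) // 2) + (odd * (odd - 1) // 2)
-- ===== SOURCE B (Python) =====
-- from typing import List
--
-- def count_even_sum_pairs(nums: List[int]) -> int:
--     # Incremental pair counting: each element closes a pair with every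
--     # earlier element of the same parity, so add the number of same-parity
--     # elements seen so far, then record this one.
--     even_seen = 0
--     odd_seen = 0
--     result = 0
--     for num in nums:
--         if num % 2 == 0:
--             result += even_seen
--             even_seen += 1
--         else:
--             result += odd_seen
--             odd_seen += 1
--     return result
-- ===== Notes on version B (the rewrite author's own statement) =====
-- stated objective: alternative
-- what changed: B counts pairs incrementally during the scan (each element adds the number of same-parity elements seen before it, carried in explicit accumulators), instead of A's two-counter parity tally followed by the nC2 floor-division closed form.
import Mathlib
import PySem

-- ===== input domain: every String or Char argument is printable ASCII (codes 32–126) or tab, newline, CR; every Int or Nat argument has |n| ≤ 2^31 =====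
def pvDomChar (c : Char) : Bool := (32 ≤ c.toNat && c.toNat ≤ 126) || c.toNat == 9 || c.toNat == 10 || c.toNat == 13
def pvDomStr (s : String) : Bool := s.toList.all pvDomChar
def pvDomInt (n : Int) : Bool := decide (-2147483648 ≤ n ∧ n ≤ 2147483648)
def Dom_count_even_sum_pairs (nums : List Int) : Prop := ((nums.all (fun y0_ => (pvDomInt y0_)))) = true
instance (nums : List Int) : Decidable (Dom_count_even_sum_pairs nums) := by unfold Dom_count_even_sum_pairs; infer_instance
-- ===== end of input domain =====

-- B counts pairs incrementally during the scan (each element adds the same-parity elements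
-- seen before it, carried in accumulators) instead of A's parity tally plus the nC2 closed
-- form; alternative decomposition, same cost.

-- ===== PORT A =====
def count_even_sum_pairs (nums : List Int) : Int :=
  let eo := nums.foldl
    (fun (st : Int × Int) num =>
      if PySem.Int.mod num 2 == 0 then (st.1 + 1, st.2) else (st.1, st.2 + 1))
    (0, 0)
  PySem.Int.floordiv (eo.1 * (eo.1 - 1)) 2 + PySem.Int.floordiv (eo.2 * (eo.2 - 1)) 2

-- ===== PORT B =====
-- the loop of Source B as structural recursion over nums with the three accumulators
def pvScanB (l : List Int) (even_seen odd_seen result : Int) : Int :=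
  match l with
  | [] => result
  | num :: rest =>
    if PySem.Int.mod num 2 == 0 then
      pvScanB rest (even_seen + 1) odd_seen (result + even_seen)
    else
      pvScanB rest even_seen (odd_seen + 1) (result + odd_seen)

def count_even_sum_pairs_alt (nums : List Int) : Int :=
  pvScanB nums 0 0 0

-- ===== PRECONDITION & SPEC =====
def Spec_count_even_sum_pairs (nums : List Int) (out : Int) : Prop := out = count_even_sum_pairs_alt nums
instance (nums : List Int) (out : Int) : Decidable (Spec_count_even_sum_pairs nums out) := by unfold Spec_count_even_sum_pairs; infer_instance

-- ===== CLAIM (what is proved, stated in full; the proofs are below) =====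
def Claim_equal_count_even_sum_pairs : Prop := ∀ (nums : List Int), Dom_count_even_sum_pairs nums → Spec_count_even_sum_pairs nums (count_even_sum_pairs nums)

-- ===== LEMMAS AND PROOFS =====

-- number of even / odd elements, as Int
def pvCE (l : List Int) : Int := (l.countP (fun n => PySem.Int.mod n 2 == 0) : Int)
def pvCO (l : List Int) : Int := (l.countP (fun n => ¬ PySem.Int.mod n 2 == 0) : Int)

lemma pvCE_cons (n : Int) (l : List Int) :
    pvCE (n :: l) = if PySem.Int.mod n 2 == 0 then pvCE l + 1 else pvCE l := by
  simp [pvCE, List.countP_cons]; split <;> simp_all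

lemma pvCO_cons (n : Int) (l : List Int) :
    pvCO (n :: l) = if PySem.Int.mod n 2 == 0 then pvCO l else pvCO l + 1 := by
  simp [pvCO, List.countP_cons]; split <;> simp_all

-- A's fold computes the two parity counts
lemma a_fold_eq (l : List Int) : ∀ e o : Int,
    l.foldl (fun (st : Int × Int) num =>
        if PySem.Int.mod num 2 == 0 then (st.1 + 1, st.2) else (st.1, st.2 + 1)) (e, o)
      = (e + pvCE l, o + pvCO l) := by
  induction l with
  | nil => intro e o; simp [pvCE, pvCO]
  | cons n l ih =>
    intro e o
    simp only [List.foldl_cons, pvCE_cons, pvCO_cons]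
    by_cases h : (PySem.Int.mod n 2 == 0) = true
    · rw [if_pos h, if_pos h, if_pos h, ih]
      refine Prod.ext (by ring) (by ring)
    · rw [if_neg h, if_neg h, if_neg h, ih]
      refine Prod.ext (by ring) (by ring)

-- triangle step: ((e+1)*e) // 2 = (e*(e-1)) // 2 + e
lemma tri_step (e : Int) :
    PySem.Int.floordiv ((e + 1) * e) 2 = PySem.Int.floordiv (e * (e - 1)) 2 + e := by
  rw [PySem.Int.floordiv_eq_ediv_of_pos (by omega), PySem.Int.floordiv_eq_ediv_of_pos (by omega)]
  have h : (e + 1) * e = e * (e - 1) + e * 2 := by ring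
  rw [h, Int.add_mul_ediv_right _ _ (by omega)]

-- B's recursion, closed form: result plus cross terms plus both triangle numbers
lemma pvScanB_eq (l : List Int) : ∀ e o r : Int,
    pvScanB l e o r
      = r + e * pvCE l + o * pvCO l +
        PySem.Int.floordiv (pvCE l * (pvCE l - 1)) 2 +
        PySem.Int.floordiv (pvCO l * (pvCO l - 1)) 2 := by
  induction l with
  | nil => intro e o r; simp [pvScanB, pvCE, pvCO, PySem.Int.floordiv]
  | cons n l ih =>
    intro e o r
    simp only [pvScanB, pvCE_cons, pvCO_cons]
    by_cases h : (PySem.Int.mod n 2 == 0) = true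
    · rw [if_pos h, if_pos h, if_pos h, ih]
      rw [show pvCE l + 1 - 1 = (pvCE l - 1) + 1 by ring]
      rw [show (pvCE l + 1) * (pvCE l - 1 + 1) = ((pvCE l) + 1) * (pvCE l) by ring, tri_step]
      ring
    · rw [if_neg h, if_neg h, if_neg h, ih]
      rw [show pvCO l + 1 - 1 = (pvCO l - 1) + 1 by ring]
      rw [show (pvCO l + 1) * (pvCO l - 1 + 1) = ((pvCO l) + 1) * (pvCO l) by ring, tri_step]
      ring

-- ===== VERDICT (by name: the statement is the Claim_ definition above) =====
theorem count_even_sum_pairs_spec : Claim_equal_count_even_sum_pairs := by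
  intro nums _
  unfold Spec_count_even_sum_pairs count_even_sum_pairs count_even_sum_pairs_alt
  rw [pvScanB_eq, a_fold_eq]
  ring_nf
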